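-- pv_equiv track=rewrite | github.com/jkhwang150/CodingTest | python/level1/level1_12.py | solution
-- ===== SOURCE A (Python) =====
-- def solution(k, m, score):
--     answer = 0
--     score.sort(reverse=True)
--     lis = []
--     arr = []
--     for i in range(0,len(score)//m):
--         lis.append(min(score[m*i:m*(i+1)])*m)
--
--     return sum(lis)
-- ===== SOURCE B (Python) =====
-- def solution(k, m, score):
--     score.sort(reverse=True)
--     total = 0
--     c = m
--     for x in score:
--         c -= 1
--         if c == 0:
--             total += x
--             c = m
--     return m * total
-- ===== Notes on version B (the rewrite author's own statement) =====
-- stated objective: alternative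
-- what changed: A builds a list of min-over-each-m-slice of the descending sort and sums it; B makes a single pass over the sorted list with a countdown counter that resets every m elements, accumulating the element on which the counter hits zero (each group's minimum) and multiplying by m once — no slicing, no min, no index arithmetic, no intermediate list.
import Mathlib
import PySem

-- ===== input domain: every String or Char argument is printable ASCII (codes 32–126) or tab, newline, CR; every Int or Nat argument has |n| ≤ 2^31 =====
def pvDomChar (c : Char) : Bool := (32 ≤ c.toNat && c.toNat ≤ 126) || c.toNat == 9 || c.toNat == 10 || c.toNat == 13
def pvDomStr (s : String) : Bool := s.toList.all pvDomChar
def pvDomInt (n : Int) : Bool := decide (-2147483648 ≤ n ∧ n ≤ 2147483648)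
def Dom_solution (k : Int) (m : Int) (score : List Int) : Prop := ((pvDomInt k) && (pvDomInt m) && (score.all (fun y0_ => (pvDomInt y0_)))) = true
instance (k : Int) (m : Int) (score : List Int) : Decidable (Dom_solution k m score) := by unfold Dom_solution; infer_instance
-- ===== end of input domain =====

-- B replaces A's list of min-over-each-m-slice by a single pass over the descending
-- sort with a countdown counter resetting every m elements; both sort `score` in
-- place (same mutation); the equivalence proved is about the return value.

-- ===== PORT A =====
-- min() on the group slice: Python's min raises on []; the port uses (min? …).getD 0,
-- a branch the loop never reaches under Pre_ (the slice is never empty there).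
def solution (k : Int) (m : Int) (score : List Int) : Int :=
  let s := PySem.List.sorted score (fun x => x) true
  ((PySem.List.pyRange 0 (PySem.Int.floordiv ((s.length : Int)) m) 1).foldl
      (fun lis i =>
        lis ++ [(PySem.List.min? (PySem.List.slice s (some (m * i)) (some (m * (i + 1)))) (fun x => x)).getD 0 * m])
      ([] : List Int)).sum

-- ===== PORT B =====
def solution_alt (k : Int) (m : Int) (score : List Int) : Int :=
  let s := PySem.List.sorted score (fun x => x) true
  let p := s.foldl
      (fun (p : Int × Int) x =>
        let c := p.2 - 1
        if c = 0 then (p.1 + x, m) else (p.1, c))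
      ((0 : Int), m)
  m * p.1

-- ===== PRECONDITION & SPEC =====
-- m = 0 makes Python A raise ZeroDivisionError at len(score)//m; nothing else raises.
def Pre_solution (k : Int) (m : Int) (score : List Int) : Prop := m ≠ 0
instance (k : Int) (m : Int) (score : List Int) : Decidable (Pre_solution k m score) := by unfold Pre_solution; infer_instance
def pvWitness_solution : Int × Int × List Int := (2, 2, [10, 7, 9, 3])

def Spec_solution (k : Int) (m : Int) (score : List Int) (out : Int) : Prop := out = solution_alt k m score
instance (k : Int) (m : Int) (score : List Int) (out : Int) : Decidable (Spec_solution k m score out) := by unfold Spec_solution; infer_instance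

-- ===== CLAIM (what is proved, stated in full; the proofs are below) =====
def Claim_equal_solution : Prop := ∀ (k : Int) (m : Int) (score : List Int), Dom_solution k m score → Pre_solution k m score → Spec_solution k m score (solution k m score)
-- ===== LEMMAS AND PROOFS =====

-- `pick xs c`: the value B's countdown accumulates while scanning xs with current
-- counter c (reset value m): the sum of the elements at positions c-1, c-1+m, c-1+2m, ….
def pick (m : Int) : List Int → Int → Int
  | [], _ => 0
  | x :: t, c => if c - 1 = 0 then x + pick m t m else pick m t (c - 1)

theorem foldl_countdown (m : Int) :
    ∀ (xs : List Int) (tot c : Int),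
      (xs.foldl (fun (p : Int × Int) x =>
          let c := p.2 - 1
          if c = 0 then (p.1 + x, m) else (p.1, c)) (tot, c)).1
        = tot + pick m xs c := by
  intro xs
  induction xs with
  | nil => intro tot c; simp [pick]
  | cons x t ih =>
    intro tot c
    by_cases h : c - 1 = 0
    · simp [pick, h, ih]; ring
    · simp [pick, h, ih]

theorem pick_nonpos (m : Int) : ∀ (xs : List Int) (c : Int), c ≤ 0 → pick m xs c = 0 := by
  intro xs
  induction xs with
  | nil => intro c _; simp [pick]
  | cons x t ih =>
    intro c hc
    simp only [pick, if_neg (by omega : ¬ c - 1 = 0)]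
    exact ih (c - 1) (by omega)

theorem pick_short (m : Int) : ∀ (xs : List Int) (c : Int), 1 ≤ c → (xs.length : Int) < c →
    pick m xs c = 0 := by
  intro xs
  induction xs with
  | nil => intro c _ _; simp [pick]
  | cons x t ih =>
    intro c hc hlen
    simp only [List.length_cons] at hlen
    have h1 : ¬ c - 1 = 0 := by push_cast at hlen; omega
    simp only [pick, if_neg h1]
    exact ih (c - 1) (by push_cast at hlen; omega) (by push_cast at hlen ⊢; omega)

theorem pick_step (m : Int) : ∀ (xs : List Int) (c : Int), 1 ≤ c → c ≤ (xs.length : Int) →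
    pick m xs c = xs.getD (c - 1).toNat 0 + pick m (xs.drop c.toNat) m := by
  intro xs
  induction xs with
  | nil => intro c hc hlen; simp at hlen; omega
  | cons x t ih =>
    intro c hc hlen
    by_cases h1 : c = 1
    · subst h1; simp [pick]
    · have hc2 : 2 ≤ c := by omega
      simp only [List.length_cons] at hlen
      have hlen' : c - 1 ≤ (t.length : Int) := by push_cast at hlen; omega
      simp only [pick, if_neg (by omega : ¬ c - 1 = 0)]
      rw [ih (c - 1) (by omega) hlen']
      have hg : (x :: t).getD (c - 1).toNat 0 = t.getD (c - 1 - 1).toNat 0 := by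
        rw [show (c - 1).toNat = (c - 1 - 1).toNat + 1 by omega]; simp
      have hdp : (x :: t).drop c.toNat = t.drop (c - 1).toNat := by
        rw [show c.toNat = (c - 1).toNat + 1 by omega, List.drop_succ_cons]
      rw [hg, hdp]

-- In a descending list the last element is a lower bound.
theorem getLast_le_of_desc {l : List Int} (h : l.Pairwise (fun a b => b ≤ a)) (hne : l ≠ []) :
    ∀ x ∈ l, l.getLast hne ≤ x := by
  intro x hx
  rw [List.getLast_eq_getElem]
  obtain ⟨i, hi, rfl⟩ := List.mem_iff_getElem.mp hx
  by_cases hieq : i = l.length - 1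
  · subst hieq; exact le_rfl
  · exact List.pairwise_iff_getElem.mp h i (l.length - 1) hi (by omega) (by omega)

-- Python's min of a nonempty descending list is (as a value) its last element.
theorem min?_getD_eq_getLast (l : List Int) (h : l.Pairwise (fun a b => b ≤ a)) (hne : l ≠ []) :
    (PySem.List.min? l (fun x => x)).getD 0 = l.getLast hne := by
  cases hmv : PySem.List.min? l (fun x => x) with
  | none => exact absurd ((PySem.List.min?_eq_none_iff l _).mp hmv) hne
  | some mv =>
    have hmem := PySem.List.min?_mem hmv
    have hmin := PySem.List.min?_isMin hmv
    simp only [Option.getD_some]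
    exact le_antisymm (hmin _ (List.getLast_mem hne)) (getLast_le_of_desc h hne mv hmem)

-- One group: min of the i-th descending block of size m is the element at index m*i+m-1.
theorem block_min_eq_get (s : List Int) (hp : s.Pairwise (fun a b => b ≤ a)) (m i : Int)
    (hm : 1 ≤ m) (hi : 0 ≤ i) (hin : m * i + m ≤ (s.length : Int)) :
    (PySem.List.min? (PySem.List.slice s (some (m * i)) (some (m * (i + 1)))) (fun x => x)).getD 0
      = PySem.List.pyGetD s (m * i + m - 1) 0 := by
  have hA : (0 : Int) ≤ m * i := mul_nonneg (by omega) hi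
  set A : Int := m * i with hAdef
  have hsplit : m * (i + 1) = A + m := by rw [hAdef]; ring
  rw [hsplit, PySem.List.slice_toNat s hA (by omega)]
  have hlen : (List.take ((A + m).toNat - A.toNat) (List.drop A.toNat s)).length = m.toNat := by
    simp [List.length_take, List.length_drop]; omega
  have hne : List.take ((A + m).toNat - A.toNat) (List.drop A.toNat s) ≠ [] := by
    intro hcon; rw [hcon] at hlen; simp at hlen; omega
  have hsub : List.Sublist (List.take ((A + m).toNat - A.toNat) (List.drop A.toNat s)) s :=
    (List.take_sublist _ _).trans (List.drop_sublist _ _)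
  rw [min?_getD_eq_getLast _ (hp.sublist hsub) hne, List.getLast_eq_getElem]
  rw [PySem.List.pyGetD_eq_getElem s 0 (by omega) (by omega)]
  simp only [hlen]
  rw [List.getElem_take, List.getElem_drop]
  congr 1
  omega

-- uniqueness of floor quotient from 'q*m + r = a, 0 ≤ r < m'
theorem fdiv_unique (m a q r : Int) (hm : 1 ≤ m) (hq : q * m + r = a) (h0 : 0 ≤ r) (h1 : r < m) :
    PySem.Int.floordiv a m = q := by
  have hd := PySem.Int.floordiv_mul_add_mod a m
  have hr0 := PySem.Int.mod_nonneg a (by omega : (0:Int) < m)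
  have hr1 := PySem.Int.mod_lt a (by omega : (0:Int) < m)
  set Q := PySem.Int.floordiv a m
  set R := PySem.Int.mod a m
  have hdiff : (Q - q) * m = r - R := by nlinarith [hd]
  rcases lt_trichotomy Q q with h | h | h
  · nlinarith
  · exact h
  · nlinarith

-- the strided sum over full groups equals the countdown's pick
theorem stride_pick (m : Int) (hm : 1 ≤ m) :
    ∀ (n : Nat) (s : List Int), s.length = n →
      ((PySem.List.pyRange 0 (PySem.Int.floordiv ((s.length : Int)) m) 1).map
          (fun i => PySem.List.pyGetD s (m * i + m - 1) 0)).sum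
        = pick m s m := by
  intro n
  induction n using Nat.strong_induction_on with
  | _ n ih =>
    intro s hlen
    by_cases hlt : (s.length : Int) < m
    · have hq : PySem.Int.floordiv ((s.length : Int)) m = 0 :=
        fdiv_unique m _ 0 (s.length : Int) hm (by ring) (by positivity) hlt
      rw [hq, PySem.List.pyRange_one_eq_nil (by omega)]
      simp [pick_short m s m hm hlt]
    · push_neg at hlt
      have hd := PySem.Int.floordiv_mul_add_mod ((s.length : Int) - m) m
      have hr0 := PySem.Int.mod_nonneg ((s.length : Int) - m) (by omega : (0:Int) < m)
      have hr1 := PySem.Int.mod_lt ((s.length : Int) - m) (by omega : (0:Int) < m)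
      have hq : PySem.Int.floordiv ((s.length : Int)) m
          = PySem.Int.floordiv ((s.length : Int) - m) m + 1 :=
        fdiv_unique m _ _ (PySem.Int.mod ((s.length : Int) - m) m) hm (by nlinarith [hd]) hr0 hr1
      have hq0 : 0 ≤ PySem.Int.floordiv ((s.length : Int) - m) m := by nlinarith [hd]
      set q' := PySem.Int.floordiv ((s.length : Int) - m) m with hq'
      rw [hq, PySem.List.pyRange_one_cons (by omega)]
      -- drop length facts
      have hdl : ((s.drop m.toNat).length : Int) = (s.length : Int) - m := by
        simp [List.length_drop]; omega
      have hdn : (s.drop m.toNat).length < n := by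
        simp [List.length_drop]; omega
      have ihd := ih _ hdn (s.drop m.toNat) rfl
      rw [hdl, ← hq'] at ihd
      -- shift the tail range
      have hshift :
          ((PySem.List.pyRange (0 + 1) (q' + 1) 1).map (fun i => PySem.List.pyGetD s (m * i + m - 1) 0)).sum
            = ((PySem.List.pyRange 0 q' 1).map
                (fun i => PySem.List.pyGetD (s.drop m.toNat) (m * i + m - 1) 0)).sum := by
        rw [PySem.List.pyRange_one (a := 0 + 1), PySem.List.pyRange_one (a := 0)]
        have he : ((q' + 1 - (0 + 1)).toNat) = (q' - 0).toNat := by omega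
        rw [he, List.map_map, List.map_map]
        congr 1
        apply List.map_congr_left
        intro j hj
        have hkq : (j : Int) < q' := by
          have := List.mem_range.mp hj; omega
        have hk0 : (0:Int) ≤ (j : Int) := Int.natCast_nonneg j
        have hmul : ((j : Int) + 1) * m ≤ q' * m :=
          mul_le_mul_of_nonneg_right (by omega) (by omega)
        simp only [Function.comp, zero_add]
        have hi1 : (0:Int) ≤ m * (1 + (j : Int)) + m - 1 := by nlinarith
        have hi2 : m * (1 + (j : Int)) + m - 1 < (s.length : Int) := by nlinarith [hd]
        have hj1 : (0:Int) ≤ m * (j : Int) + m - 1 := by nlinarith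
        have hj2 : m * (j : Int) + m - 1 < (s.length : Int) - m := by nlinarith [hd]
        rw [PySem.List.pyGetD_eq_getElem s 0 hi1 hi2,
          PySem.List.pyGetD_eq_getElem (s.drop m.toNat) 0 hj1 (by rw [hdl]; exact hj2)]
        rw [List.getElem_drop]
        congr 1
        rw [show m * (1 + (j : Int)) + m - 1 = m + (m * (j : Int) + m - 1) from by ring,
          Int.toNat_add (by omega) hj1]
      rw [List.map_cons, List.sum_cons, hshift, ihd]
      -- pick side
      rw [pick_step m s m hm hlt]
      have hh : m * 0 + m - 1 = m - 1 := by ring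
      rw [hh]
      congr 1
      rw [PySem.List.pyGetD_eq_getElem s 0 (by omega) (by omega),
        List.getD_eq_getElem s 0 (by omega : (m - 1).toNat < s.length)]

-- ===== VERDICT (by name: the statement is the Claim_ definition above) =====
theorem solution_spec : Claim_equal_solution := by
  intro k m score _ hpre
  unfold Spec_solution solution solution_alt
  dsimp only
  set s := PySem.List.sorted score (fun x => x) true with hs
  rw [foldl_countdown, PySem.List.foldl_append_singleton_eq_map]
  simp only [List.nil_append, zero_add]
  have hm0 : m ≠ 0 := hpre
  rcases (by omega : m < 0 ∨ 1 ≤ m) with hneg | hm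
  · -- m < 0: A's range is empty; B's countdown never fires.
    have hq0 : PySem.Int.floordiv ((s.length : Int)) m ≤ 0 := by
      have hd := PySem.Int.floordiv_mul_add_mod ((s.length : Int)) m
      have hmb := PySem.Int.mod_neg_bounds ((s.length : Int)) hneg
      have hn : (0 : Int) ≤ (s.length : Int) := by positivity
      nlinarith
    rw [PySem.List.pyRange_one_eq_nil hq0, pick_nonpos m s m (by omega)]
    simp
  · have key : ∀ i ∈ PySem.List.pyRange 0 (PySem.Int.floordiv ((s.length : Int)) m) 1,
        (PySem.List.min? (PySem.List.slice s (some (m * i)) (some (m * (i + 1)))) (fun x => x)).getD 0 * m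
          = PySem.List.pyGetD s (m * i + m - 1) 0 * m := by
      intro i hi
      rcases (PySem.List.mem_pyRange_one).mp hi with ⟨hi0, hiq⟩
      have hd := PySem.Int.floordiv_mul_add_mod ((s.length : Int)) m
      have hr0 := PySem.Int.mod_nonneg ((s.length : Int)) (by omega : (0:Int) < m)
      have hin : m * i + m ≤ (s.length : Int) := by nlinarith
      rw [block_min_eq_get s (PySem.List.sorted_pairwise_rev score (fun x => x)) m i hm hi0 hin]
    rw [List.map_congr_left key, List.sum_map_mul_right,
      stride_pick m hm s.length s rfl, mul_comm]
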